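-- pv_equiv track=rewrite | github.com/or-m-or/KT-AIVLE-School-5th_Codingmasters | example/round2/Intermediate/Q8703_일차원세계의섬/A8703.py | solution
-- ===== SOURCE A (Python) =====
-- def count_islands(map_str):
--     count = 0
--     in_island = False
--     for ch in map_str:
--         if ch == 'g':
--             if not in_island:
--                 count += 1
--                 in_island = True
--         else:
--             in_island = False
--     return count
--
-- def solution(map_str):
--     n = len(map_str)
--     min_map = list(map_str)
--     max_map = list(map_str)
--
--     # 최소 섬 개수를 위한 맵 변환
--     i = 0
--     while i < n:
--         if min_map[i] == 'x':
--             if (i > 0 and min_map[i-1] == 'g') or (i < n-1 and min_map[i+1] == 'g'):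
--                 min_map[i] = 'g'
--             else:
--                 min_map[i] = 'o'
--         i += 1
--
--     # 최대 섬 개수를 위한 맵 변환
--     i = 0
--     while i < n:
--         if max_map[i] == 'x':
--             start = i
--             while i < n and max_map[i] == 'x':
--                 i += 1
--             length = i - start
--             left = max_map[start-1] if start > 0 else 'o'
--             right = max_map[i] if i < n else 'o'
--
--             fill_char = 'g' if left == 'o' else 'o'
--             for j in range(start, i):
--                 max_map[j] = fill_char
--                 fill_char = 'o' if fill_char == 'g' else 'g'
--             continue
--         i += 1
--
--     min_islands = count_islands(''.join(min_map))
--     max_islands = count_islands(''.join(max_map))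
--
--     return min_islands, max_islands
-- ===== SOURCE B (Python) =====
-- def solution(map_str):
--     n = len(map_str)
--     mc = xc = 0            # running min / max island counts
--     mi = xi = False        # "currently inside an island" for min / max fills
--     i = 0
--     while i < n:
--         c = map_str[i]
--         if c == 'x':
--             j = i + 1
--             while j < n and map_str[j] == 'x':
--                 j += 1
--             L = j - i
--             left = map_str[i-1] if i > 0 else 'o'
--             right = map_str[j] if j < n else 'o'
--             # min fill: all 'g' if left=='g' (merges, no new island);
--             # else all 'o' except last cell 'g' when right=='g' (one new island)
--             if left == 'g':
--                 mi = True
--             elif right == 'g':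
--                 mc += 1
--                 mi = True
--             else:
--                 mi = False
--             # max fill: alternate starting 'g' iff left=='o'; every 'g' is isolated
--             if left == 'o':
--                 xc += (L + 1) // 2
--                 xi = (L % 2 == 1)
--             else:
--                 xc += L // 2
--                 xi = (L % 2 == 0)
--             i = j
--         elif c == 'g':
--             if not mi:
--                 mc += 1
--             if not xi:
--                 xc += 1
--             mi = xi = True
--             i += 1
--         else:
--             mi = xi = False
--             i += 1
--     return mc, xc
-- ===== Notes on version B (the rewrite author's own statement) =====
-- stated objective: faster
-- what changed: B scans the string once, run by run, updating both island counters arithmetically (ceil/floor of run length for the max fill, a constant-case rule for the min fill) instead of building two fully filled map lists and counting islands over each.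
import Mathlib
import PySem

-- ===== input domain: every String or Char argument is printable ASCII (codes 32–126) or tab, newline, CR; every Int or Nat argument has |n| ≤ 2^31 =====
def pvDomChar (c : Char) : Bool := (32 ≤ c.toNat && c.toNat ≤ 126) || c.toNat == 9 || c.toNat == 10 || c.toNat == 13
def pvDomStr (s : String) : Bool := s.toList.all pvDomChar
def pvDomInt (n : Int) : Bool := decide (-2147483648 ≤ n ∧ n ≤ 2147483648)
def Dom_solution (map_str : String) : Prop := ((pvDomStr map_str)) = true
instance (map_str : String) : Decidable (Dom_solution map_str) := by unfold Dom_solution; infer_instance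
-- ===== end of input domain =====

-- B replaces A's build-two-filled-maps-then-count with a single run-by-run scan that
-- updates both island counters arithmetically; same O(n) asymptotics, no intermediate maps.

-- ===== PORT A =====
-- count_islands: fold over the characters with state (count, in_island)
def cStep (s : Int × Bool) (ch : Char) : Int × Bool :=
  if ch = 'g' then (if s.2 then s else (s.1 + 1, true)) else (s.1, false)

def countIslands (l : List Char) : Int := (l.foldl cStep (0, false)).1

-- A's first while loop: mutates min_map left to right; min_map[i-1] is the char just
-- written (prev, none when i = 0) and min_map[i+1] is still the original next char
-- (rest.head?, none when i = n-1) — the standard mutation→accumulator transcription.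
def minPass : Option Char → List Char → List Char
  | _, [] => []
  | prev, c :: rest =>
    let c' := if c = 'x' then (if prev = some 'g' ∨ rest.head? = some 'g' then 'g' else 'o') else c
    c' :: minPass (some c') rest

-- the alternating fill of A's inner for-loop (fill_char flipping each step)
def altFill : Char → Nat → List Char
  | _, 0 => []
  | ch, k + 1 => ch :: altFill (if ch = 'g' then 'o' else 'g') k

-- A's second while loop: on an 'x' it consumes the whole maximal run (inner while),
-- fills it alternately from `left` ('o' at the boundary), and continues after the run.
-- `prev` is max_map[i-1]; after a run the next head is never 'x', so the 'o' passed
-- there is never read (A reads max_map[start-1] only at a run start, a non-'x' char).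
def maxPass : Char → List Char → List Char
  | _, [] => []
  | prev, c :: rest =>
    if c = 'x' then
      altFill (if prev = 'o' then 'g' else 'o') ((rest.takeWhile (· == 'x')).length + 1)
        ++ maxPass 'o' (rest.dropWhile (· == 'x'))
    else
      c :: maxPass c rest
  termination_by _ l => l.length
  decreasing_by
    · have := List.length_dropWhile_le (· == 'x') rest; simp; omega
    · simp

def solution (map_str : String) : Int × Int :=
  (countIslands (minPass none map_str.toList), countIslands (maxPass 'o' map_str.toList))

-- ===== PORT B =====
-- single pass over the runs: prev = previous original char ('o' at the left boundary),
-- mi/xi = "inside an island" flags, mc/xc = the two running counts (Source B's while loop)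
def loopB : Char → Int → Int → Bool → Bool → List Char → Int × Int
  | _, mc, xc, _, _, [] => (mc, xc)
  | prev, mc, xc, mi, xi, c :: rest =>
    if c = 'x' then
      let L := (rest.takeWhile (· == 'x')).length + 1
      let tail := rest.dropWhile (· == 'x')
      let right := tail.head?.getD 'o'
      let m : Int × Bool :=
        if prev = 'g' then (mc, true)
        else if right = 'g' then (mc + 1, true)
        else (mc, false)
      let x : Int × Bool :=
        if prev = 'o' then (xc + (((L + 1) / 2 : Nat) : Int), decide (L % 2 = 1))
        else (xc + ((L / 2 : Nat) : Int), decide (L % 2 = 0))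
      loopB 'o' m.1 x.1 m.2 x.2 tail
    else if c = 'g' then
      loopB c (if mi then mc else mc + 1) (if xi then xc else xc + 1) true true rest
    else
      loopB c mc xc false false rest
  termination_by _ _ _ _ _ l => l.length
  decreasing_by
    · have := List.length_dropWhile_le (· == 'x') rest; simp; omega
    · simp
    · simp

def solution_alt (map_str : String) : Int × Int :=
  loopB 'o' 0 0 false false map_str.toList

-- ===== PRECONDITION & SPEC =====
def Spec_solution (map_str : String) (out : Int × Int) : Prop := out = solution_alt map_str
instance (map_str : String) (out : Int × Int) : Decidable (Spec_solution map_str out) := by unfold Spec_solution; infer_instance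

-- ===== CLAIM (what is proved, stated in full; the proofs are below) =====
def Claim_equal_solution : Prop := ∀ (map_str : String), Dom_solution map_str → Spec_solution map_str (solution map_str)

-- ===== LEMMAS AND PROOFS =====

lemma takeWhile_x_replicate (l : List Char) :
    l.takeWhile (· == 'x') = List.replicate (l.takeWhile (· == 'x')).length 'x' := by
  rw [List.eq_replicate_iff]
  refine ⟨rfl, fun b hb => ?_⟩
  have := List.mem_takeWhile_imp hb
  simpa using this

lemma dropWhile_x_head (l : List Char) : (l.dropWhile (· == 'x')).head? ≠ some 'x' := by
  induction l with
  | nil => simp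
  | cons a t ih =>
    by_cases h : a = 'x'
    · simpa [h] using ih
    · simp [h]

lemma takeWhile_rep_x (k : Nat) (tail : List Char) (h : tail.head? ≠ some 'x') :
    (List.replicate k 'x' ++ tail).takeWhile (· == 'x') = List.replicate k 'x' := by
  induction k with
  | zero =>
    cases tail with
    | nil => rfl
    | cons a t =>
      have ha : ¬ a = 'x' := fun hh => h (by simp [hh])
      simp [ha]
  | succ k ih => simp [List.replicate_succ, ih]

lemma dropWhile_rep_x (k : Nat) (tail : List Char) (h : tail.head? ≠ some 'x') :
    (List.replicate k 'x' ++ tail).dropWhile (· == 'x') = tail := by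
  induction k with
  | zero =>
    cases tail with
    | nil => rfl
    | cons a t =>
      have ha : ¬ a = 'x' := fun hh => h (by simp [hh])
      simp [ha]
  | succ k ih => simp [List.replicate_succ, ih]

lemma minPass_run_g (k : Nat) (tail : List Char) :
    minPass (some 'g') (List.replicate k 'x' ++ tail) =
      List.replicate k 'g' ++ minPass (some 'g') tail := by
  induction k with
  | zero => simp
  | succ k ih => simp [List.replicate_succ, minPass, ih]

lemma minPass_run_o (k : Nat) (tail : List Char) :
    ∀ (p : Option Char), p ≠ some 'g' →
    minPass p (List.replicate (k + 1) 'x' ++ tail) =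
      List.replicate k 'o' ++ (if tail.head? = some 'g' then 'g' else 'o') ::
        minPass (some (if tail.head? = some 'g' then 'g' else 'o')) tail := by
  induction k with
  | zero =>
    intro p hp
    by_cases h : tail.head? = some 'g' <;> simp [minPass, hp, h]
  | succ k ih =>
    intro p hp
    have h1 : List.replicate (k + 2) 'x' ++ tail = 'x' :: (List.replicate (k + 1) 'x' ++ tail) := by
      simp [List.replicate_succ]
    have h2 : (List.replicate (k + 1) 'x' ++ tail).head? = some 'x' := by
      simp [List.replicate_succ]
    have hcond : ¬ (p = some 'g' ∨ (List.replicate (k + 1) 'x' ++ tail).head? = some 'g') := by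
      simp [hp, h2]
    rw [h1, minPass]
    simp only [if_neg hcond, if_true]
    rw [ih (some 'o') (by simp)]
    simp [List.replicate_succ]

lemma foldl_rep_g (k : Nat) (mc : Int) :
    List.foldl cStep (mc, true) (List.replicate k 'g') = (mc, true) := by
  induction k with
  | zero => rfl
  | succ k ih => simpa [List.replicate_succ, cStep] using ih

lemma foldl_rep_o (k : Nat) (mc : Int) :
    List.foldl cStep (mc, false) (List.replicate k 'o') = (mc, false) := by
  induction k with
  | zero => rfl
  | succ k ih => simpa [List.replicate_succ, cStep] using ih

lemma foldl_fill (k : Nat) :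
    (∀ (xc : Int) (b : Bool), List.foldl cStep (xc, b) (altFill 'o' (k + 1)) =
        (xc + (((k + 1) / 2 : Nat) : Int), decide ((k + 1) % 2 = 0)))
  ∧ (∀ (xc : Int), List.foldl cStep (xc, false) (altFill 'g' (k + 1)) =
        (xc + (((k + 2) / 2 : Nat) : Int), decide ((k + 1) % 2 = 1))) := by
  induction k with
  | zero =>
    constructor
    · intro xc b; simp [altFill, cStep]
    · intro xc; simp [altFill, cStep]
  | succ k ih =>
    constructor
    · intro xc b
      have h : altFill 'o' (k + 1 + 1) = 'o' :: altFill 'g' (k + 1) := by simp [altFill]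
      rw [h, List.foldl_cons, show cStep (xc, b) 'o' = (xc, false) from by simp [cStep], ih.2 xc]
      rw [Prod.mk.injEq]
      exact ⟨by omega, decide_eq_decide.mpr (by omega)⟩
    · intro xc
      have h : altFill 'g' (k + 1 + 1) = 'g' :: altFill 'o' (k + 1) := by simp [altFill]
      rw [h, List.foldl_cons, show cStep (xc, false) 'g' = (xc + 1, true) from by simp [cStep], ih.1 (xc + 1) true]
      rw [Prod.mk.injEq]
      exact ⟨by omega, decide_eq_decide.mpr (by omega)⟩

lemma maxPass_run (prev : Char) (k : Nat) (tail : List Char) (h : tail.head? ≠ some 'x') :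
    maxPass prev (List.replicate (k + 1) 'x' ++ tail) =
      altFill (if prev = 'o' then 'g' else 'o') (k + 1) ++ maxPass 'o' tail := by
  rw [show (List.replicate (k + 1) 'x' ++ tail : List Char) = 'x' :: (List.replicate k 'x' ++ tail) from by
    simp [List.replicate_succ]]
  rw [maxPass, if_pos rfl, takeWhile_rep_x k tail h, dropWhile_rep_x k tail h]
  simp

lemma loopB_run (prev : Char) (mc xc : Int) (mi xi : Bool) (k : Nat) (tail : List Char)
    (h : tail.head? ≠ some 'x') :
    loopB prev mc xc mi xi (List.replicate (k + 1) 'x' ++ tail) =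
      loopB 'o'
        (if prev = 'g' then mc else if tail.head?.getD 'o' = 'g' then mc + 1 else mc)
        (if prev = 'o' then xc + (((k + 2) / 2 : Nat) : Int) else xc + (((k + 1) / 2 : Nat) : Int))
        (if prev = 'g' then true else if tail.head?.getD 'o' = 'g' then true else false)
        (if prev = 'o' then decide ((k + 1) % 2 = 1) else decide ((k + 1) % 2 = 0))
        tail := by
  rw [show (List.replicate (k + 1) 'x' ++ tail : List Char) = 'x' :: (List.replicate k 'x' ++ tail) from by
    simp [List.replicate_succ]]
  rw [loopB, if_pos rfl, takeWhile_rep_x k tail h, dropWhile_rep_x k tail h]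
  simp only [List.length_replicate]
  by_cases hg : prev = 'g' <;> by_cases ho : prev = 'o' <;>
    by_cases hr : tail.head?.getD 'o' = 'g' <;>
      simp [hg, ho, hr, show k + 1 + 1 = k + 2 from rfl]

lemma main (n : Nat) : ∀ (l : List Char), l.length ≤ n →
    ∀ (prev : Char) (pOpt : Option Char) (mc xc : Int) (mi xi : Bool),
    (mi = true ↔ pOpt = some 'g') →
    (l.head? = some 'x' → ((prev = 'g' ↔ pOpt = some 'g') ∧ (prev = 'o' → xi = false))) →
    loopB prev mc xc mi xi l =
      ((List.foldl cStep (mc, mi) (minPass pOpt l)).1,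
       (List.foldl cStep (xc, xi) (maxPass prev l)).1) := by
  induction n with
  | zero =>
    intro l hl prev pOpt mc xc mi xi h1 h2
    have : l = [] := by cases l <;> simp_all
    subst this
    simp [loopB, minPass, maxPass]
  | succ n ih =>
    intro l hl prev pOpt mc xc mi xi h1 h2
    match l with
    | [] => simp [loopB, minPass, maxPass]
    | c :: rest =>
      have hlr : rest.length ≤ n := by simpa using hl
      by_cases hx : c = 'x'
      · subst hx
        obtain ⟨Hpg, Hxo⟩ := h2 rfl
        have hth : (List.dropWhile (· == 'x') rest).head? ≠ some 'x' := dropWhile_x_head rest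
        have hsplit : rest = List.replicate (rest.takeWhile (· == 'x')).length 'x'
            ++ rest.dropWhile (· == 'x') := by
          conv_lhs => rw [← List.takeWhile_append_dropWhile (p := (· == 'x')) (l := rest)]
          rw [takeWhile_x_replicate rest]
          simp
        generalize hk : (List.takeWhile (· == 'x') rest).length = k at hsplit
        generalize htail : List.dropWhile (· == 'x') rest = tail at hsplit hth
        have htl : tail.length ≤ n := by
          have h1' : tail.length ≤ rest.length := htail ▸ List.length_dropWhile_le _ _
          omega
        have hxl : ('x' :: rest : List Char) = List.replicate (k + 1) 'x' ++ tail := by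
          rw [hsplit]; simp [List.replicate_succ]
        rw [hxl, loopB_run prev mc xc mi xi k tail hth, maxPass_run prev k tail hth]
        by_cases hpg : prev = 'g'
        · -- left neighbour 'g': whole min run becomes 'g'
          have hpopt : pOpt = some 'g' := Hpg.mp hpg
          have hmi : mi = true := h1.mpr hpopt
          subst hpg hpopt hmi
          rw [minPass_run_g (k + 1) tail]
          rw [List.foldl_append, foldl_rep_g, List.foldl_append]
          simp only [Char.reduceEq, reduceIte]
          rw [(foldl_fill k).1 xc xi]
          exact ih tail htl 'o' (some 'g') mc (xc + (((k + 1) / 2 : Nat) : Int)) true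
            (decide ((k + 1) % 2 = 0)) (by simp) (fun h => absurd h hth)
        · have hpopt : pOpt ≠ some 'g' := fun h => hpg (Hpg.mpr h)
          have hmi : mi = false := by
            cases hmm : mi
            · rfl
            · exact absurd (h1.mp hmm) hpopt
          subst hmi
          rw [minPass_run_o k tail pOpt hpopt]
          rw [List.foldl_append, foldl_rep_o, List.foldl_cons]
          simp only [if_neg hpg]
          by_cases hpo : prev = 'o'
          · have hxi : xi = false := Hxo hpo
            subst hxi
            rw [List.foldl_append]
            simp only [if_pos hpo]
            rw [(foldl_fill k).2 xc]
            by_cases hg : tail.head? = some 'g'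
            · have hr : tail.head?.getD 'o' = 'g' := by simp [hg]
              simp only [if_pos hg, if_pos hr,
                show cStep (mc, false) 'g' = (mc + 1, true) from by simp [cStep]]
              exact ih tail htl 'o' (some 'g') (mc + 1) (xc + (((k + 2) / 2 : Nat) : Int)) true
                (decide ((k + 1) % 2 = 1)) (by simp) (fun h => absurd h hth)
            · have hr : ¬ tail.head?.getD 'o' = 'g' := by
                cases hh : tail.head? with
                | none => simp
                | some a => simp; intro hha; exact absurd (by rw [hh, hha]) hg
              simp only [if_neg hg, if_neg hr,
                show cStep (mc, false) 'o' = (mc, false) from by simp [cStep]]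
              exact ih tail htl 'o' (some 'o') mc (xc + (((k + 2) / 2 : Nat) : Int)) false
                (decide ((k + 1) % 2 = 1)) (by simp) (fun h => absurd h hth)
          · rw [List.foldl_append]
            simp only [if_neg hpo]
            rw [(foldl_fill k).1 xc xi]
            by_cases hg : tail.head? = some 'g'
            · have hr : tail.head?.getD 'o' = 'g' := by simp [hg]
              simp only [if_pos hg, if_pos hr,
                show cStep (mc, false) 'g' = (mc + 1, true) from by simp [cStep]]
              exact ih tail htl 'o' (some 'g') (mc + 1) (xc + (((k + 1) / 2 : Nat) : Int)) true
                (decide ((k + 1) % 2 = 0)) (by simp) (fun h => absurd h hth)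
            · have hr : ¬ tail.head?.getD 'o' = 'g' := by
                cases hh : tail.head? with
                | none => simp
                | some a => simp; intro hha; exact absurd (by rw [hh, hha]) hg
              simp only [if_neg hg, if_neg hr,
                show cStep (mc, false) 'o' = (mc, false) from by simp [cStep]]
              exact ih tail htl 'o' (some 'o') mc (xc + (((k + 1) / 2 : Nat) : Int)) false
                (decide ((k + 1) % 2 = 0)) (by simp) (fun h => absurd h hth)
      · -- a known character: all three recursions copy it
        rw [show minPass pOpt (c :: rest) = c :: minPass (some c) rest from by simp [minPass, hx]]
        rw [show maxPass prev (c :: rest) = c :: maxPass c rest from by rw [maxPass, if_neg hx]]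
        rw [loopB, if_neg hx, List.foldl_cons, List.foldl_cons]
        by_cases hg : c = 'g'
        · subst hg
          rw [if_pos rfl]
          rw [show cStep (mc, mi) 'g' = ((if mi then mc else mc + 1), true) from by
            cases mi <;> simp [cStep]]
          rw [show cStep (xc, xi) 'g' = ((if xi then xc else xc + 1), true) from by
            cases xi <;> simp [cStep]]
          exact ih rest hlr 'g' (some 'g') (if mi then mc else mc + 1) (if xi then xc else xc + 1)
            true true (by simp) (fun _ => ⟨by simp, by simp⟩)
        · rw [if_neg hg]
          rw [show cStep (mc, mi) c = (mc, false) from by simp [cStep, hg]]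
          rw [show cStep (xc, xi) c = (xc, false) from by simp [cStep, hg]]
          exact ih rest hlr c (some c) mc xc false false (by simp [hg])
            (fun _ => ⟨by simp, fun _ => rfl⟩)

-- ===== VERDICT (by name: the statement is the Claim_ definition above) =====
theorem solution_spec : Claim_equal_solution := by
  intro map_str _
  unfold Spec_solution solution solution_alt countIslands
  rw [main (map_str.toList.length) map_str.toList le_rfl 'o' none 0 0 false false (by simp)
    (fun _ => ⟨by simp, fun _ => rfl⟩)]
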